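-- pv_equiv track=rewrite | github.com/VavdiG14/Ultimate-Fantasy-Premier-League | Tekme/analiza_tekem.py | minutaRdeciKarton
-- ===== SOURCE A (Python) =====
-- def minutaRdeciKarton(string):
--     se = string.split(" ")
--     min = se[-1][:-1]
--     ime = ""
--     for i in se[:-1]:
--         ime += i
--         ime += " "
--     return ime[:-1], int(min)
-- ===== SOURCE B (Python) =====
-- def minutaRdeciKarton(string):
--     ime, _, zadnja = string.rpartition(" ")
--     return ime, int(zadnja[:-1])
-- ===== Notes on version B (the rewrite author's own statement) =====
-- stated objective: simpler
-- what changed: B replaces A's split-into-all-tokens plus rejoin-with-spaces accumulator loop by a single rpartition at the last space, returning the prefix directly and parsing the last token.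
import Mathlib
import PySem

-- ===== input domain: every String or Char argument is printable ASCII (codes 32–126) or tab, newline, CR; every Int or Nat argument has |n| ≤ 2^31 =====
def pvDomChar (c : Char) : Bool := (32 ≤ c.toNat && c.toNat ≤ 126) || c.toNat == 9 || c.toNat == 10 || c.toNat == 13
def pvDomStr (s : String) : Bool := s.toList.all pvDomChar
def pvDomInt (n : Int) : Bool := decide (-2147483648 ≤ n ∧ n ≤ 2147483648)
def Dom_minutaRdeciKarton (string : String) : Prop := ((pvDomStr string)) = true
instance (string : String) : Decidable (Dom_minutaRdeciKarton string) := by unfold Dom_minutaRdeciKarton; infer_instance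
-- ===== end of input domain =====

-- B replaces A's split-all-tokens-then-rejoin loop by a single right partition at the
-- last space (str.rpartition), same return value (objective: simpler).

-- ===== PORT A =====
def minutaRdeciKarton (string : String) : String × Int :=
  -- se = string.split(" ")  (the separator is the non-empty literal " ", so split? returns some)
  let se : List (List Char) := PySem.Chars.splitOn string.toList [' ']
  -- min = se[-1][:-1]  (se is never empty, so se[-1] cannot raise; pyGetD is exact here)
  let minC : List Char := PySem.List.slice (PySem.List.pyGetD se (-1) []) none (some (-1))
  -- ime = ""; for i in se[:-1]: ime += i; ime += " "
  let ime : List Char :=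
    (PySem.List.slice se none (some (-1))).foldl (fun a i => (a ++ i) ++ [' ']) []
  -- return ime[:-1], int(min)   (int() raising ValueError is excluded by Pre_)
  (String.mk (PySem.List.slice ime none (some (-1))), (PySem.Int.ofChars? minC).getD 0)

-- ===== PORT B =====
-- exact rendering of the library call string.rpartition(" "):
-- returns (some head, tail) when " " occurs (head = part before the LAST space,
-- tail = part after it), and (none, string) when it does not.
def pyRpartitionSpace : List Char → Option (List Char) × List Char
  | [] => (none, [])
  | c :: rest =>
    match pyRpartitionSpace rest with
    | (some pre, last) => (some (c :: pre), last)
    | (none, last) => if c = ' ' then (some [], last) else (none, c :: last)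

def minutaRdeciKarton_alt (string : String) : String × Int :=
  -- ime, _, zadnja = string.rpartition(" ")  (ime = "" when there is no space)
  let p := pyRpartitionSpace string.toList
  let ime : List Char := p.1.getD []
  let zadnja : List Char := p.2
  -- return ime, int(zadnja[:-1])   (int() raising ValueError is excluded by Pre_)
  (String.mk ime, (PySem.Int.ofChars? (PySem.List.slice zadnja none (some (-1)))).getD 0)

-- ===== PRECONDITION & SPEC =====
-- Pre_ excludes exactly the inputs on which Python A raises ValueError: the last
-- space-separated token with its final character dropped must parse as a Python int.
def Pre_minutaRdeciKarton (string : String) : Prop :=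
  (PySem.Int.ofChars? ((string.toList.splitOn ' ').getLastD []).dropLast).isSome = true
instance (string : String) : Decidable (Pre_minutaRdeciKarton string) := by
  unfold Pre_minutaRdeciKarton; infer_instance

def pvWitness_minutaRdeciKarton : String := "Vardy 80'"

def Spec_minutaRdeciKarton (string : String) (out : String × Int) : Prop := out = minutaRdeciKarton_alt string
instance (string : String) (out : String × Int) : Decidable (Spec_minutaRdeciKarton string out) := by unfold Spec_minutaRdeciKarton; infer_instance

-- ===== CLAIM (what is proved, stated in full; the proofs are below) =====
def Claim_equal_minutaRdeciKarton : Prop := ∀ (string : String), Dom_minutaRdeciKarton string → Pre_minutaRdeciKarton string → Spec_minutaRdeciKarton string (minutaRdeciKarton string)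

-- ===== LEMMAS AND PROOFS =====

lemma splitOn_shape (l : List Char) : ∃ h t, l.splitOn ' ' = h :: t := by
  induction l with
  | nil => exact ⟨[], [], rfl⟩
  | cons c rest ih =>
    obtain ⟨h, t, e⟩ := ih
    by_cases hc : (c == ' ') = true
    · exact ⟨[], rest.splitOn ' ', by simp [List.splitOn, List.splitOnP_cons, hc] at e ⊢⟩
    · refine ⟨c :: h, t, ?_⟩
      simp only [List.splitOn] at e ⊢
      rw [List.splitOnP_cons, e]
      simp [hc]

lemma go_cons_step (fuel : Nat) (c : Char) (rest cur : List Char) (accs : List (List Char)) :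
    PySem.Chars.splitOn.go [' '] (fuel+1) (c::rest) cur accs =
      (if [' '].isPrefixOf (c::rest) = true then
        PySem.Chars.splitOn.go [' '] fuel rest [] (cur.reverse :: accs)
      else PySem.Chars.splitOn.go [' '] fuel rest (c :: cur) accs) := by
  rw [PySem.Chars.splitOn.go.eq_def]
  rfl

lemma splitOn_go_eq (fuel : Nat) : ∀ (l cur : List Char) (accs : List (List Char)),
    l.length ≤ fuel →
    PySem.Chars.splitOn.go [' '] fuel l cur accs = accs.reverse ++ (l.splitOn ' ').modifyHead (cur.reverse ++ ·) := by
  induction fuel with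
  | zero =>
    intro l cur accs hl
    interval_cases hl2 : l.length
    have hnil : l = [] := List.length_eq_zero_iff.mp hl2
    subst hnil
    rw [PySem.Chars.splitOn.go.eq_def]
    simp [List.splitOn]
  | succ fuel ih =>
    intro l cur accs hl
    cases l with
    | nil =>
      rw [PySem.Chars.splitOn.go.eq_def]
      simp [List.splitOn]
    | cons c rest =>
      rw [go_cons_step]
      simp only [List.length_cons] at hl
      by_cases hc : c = ' '
      · have hp : [' '].isPrefixOf (c :: rest) = true := by simp [List.isPrefixOf, hc]
        rw [if_pos hp]
        rw [ih rest [] _ (by omega)]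
        obtain ⟨h, t, e⟩ := splitOn_shape rest
        simp [List.splitOn, List.splitOnP_cons, hc] at e ⊢
        simp [e]
      · have hp : [' '].isPrefixOf (c :: rest) = false := by
          simp only [List.isPrefixOf, Bool.and_eq_false_iff, beq_eq_false_iff_ne, ne_eq]
          exact Or.inl fun h => hc h.symm
        rw [if_neg (by simp [hp])]
        rw [ih rest (c :: cur) accs (by omega)]
        obtain ⟨h, t, e⟩ := splitOn_shape rest
        simp only [List.splitOn] at e ⊢
        rw [List.splitOnP_cons, e]
        simp [hc]

lemma chars_splitOn_eq (cs : List Char) :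
    PySem.Chars.splitOn cs [' '] = cs.splitOn ' ' := by
  unfold PySem.Chars.splitOn
  rw [splitOn_go_eq (cs.length + 1) cs [] [] (by omega)]
  obtain ⟨h, t, e⟩ := splitOn_shape cs
  simp [e]

lemma rpart_cons (c : Char) (rest : List Char) :
    pyRpartitionSpace (c :: rest) =
      match pyRpartitionSpace rest with
      | (some pre, last) => (some (c :: pre), last)
      | (none, last) => if c = ' ' then (some [], last) else (none, c :: last) := rfl

lemma rpart_spec (cs : List Char) :
    (pyRpartitionSpace cs).2 = (cs.splitOn ' ').getLastD [] ∧
    ((cs.splitOn ' ').dropLast.flatMap (fun t => t ++ [' '])) =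
      (match (pyRpartitionSpace cs).1 with | none => [] | some pre => pre ++ [' ']) ∧
    ((pyRpartitionSpace cs).1 = none ↔ (cs.splitOn ' ').dropLast = []) := by
  induction cs with
  | nil => simp [pyRpartitionSpace, List.splitOn]
  | cons c rest ih =>
    obtain ⟨ha, hb, hc2⟩ := ih
    obtain ⟨h, t, e⟩ := splitOn_shape rest
    have hpair : pyRpartitionSpace rest = ((pyRpartitionSpace rest).1, (pyRpartitionSpace rest).2) := rfl
    by_cases hsp : c = ' '
    · have hse : (c :: rest).splitOn ' ' = [] :: rest.splitOn ' ' := by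
        simp only [List.splitOn] at *
        rw [List.splitOnP_cons]
        simp [hsp]
      cases hpo : (pyRpartitionSpace rest).1 with
      | none =>
        rw [hpo] at hpair hc2
        have hdl : (rest.splitOn ' ').dropLast = [] := hc2.mp rfl
        have ht : t = [] := by
          have := congrArg List.length (e ▸ hdl)
          simp at this
          omega
        subst ht; subst hsp
        rw [rpart_cons, hpair, hse, e]
        rw [e] at ha hb
        clear hpair hpo hc2
        simp_all
      | some pre =>
        rw [hpo] at hpair hc2
        subst hsp
        rw [rpart_cons, hpair, hse, e]
        rw [e] at ha hb hc2
        cases t with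
        | nil => simp at hc2
        | cons b u => simp_all [List.dropLast]
    · have hse : (c :: rest).splitOn ' ' = (c :: h) :: t := by
        simp only [List.splitOn] at e ⊢
        rw [List.splitOnP_cons, e]
        simp [hsp]
      cases hpo : (pyRpartitionSpace rest).1 with
      | none =>
        rw [hpo] at hpair hc2
        have hdl : (rest.splitOn ' ').dropLast = [] := hc2.mp rfl
        have ht : t = [] := by
          have := congrArg List.length (e ▸ hdl)
          simp at this
          omega
        subst ht
        rw [rpart_cons, hpair, hse]
        rw [e] at ha hb
        clear hpair hpo hc2 hdl
        simp_all
      | some pre =>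
        rw [hpo] at hpair hc2
        rw [rpart_cons, hpair, hse]
        rw [e] at ha hb hc2
        cases t with
        | nil => simp at hc2
        | cons b u => simp_all [List.dropLast]

-- ===== VERDICT (by name: the statement is the Claim_ definition above) =====
theorem minutaRdeciKarton_spec : Claim_equal_minutaRdeciKarton := by
  intro string _ _
  simp only [Spec_minutaRdeciKarton, minutaRdeciKarton, minutaRdeciKarton_alt]
  obtain ⟨ha, hb, -⟩ := rpart_spec string.toList
  obtain ⟨h, t, e⟩ := splitOn_shape string.toList
  have hne : string.toList.splitOn ' ' ≠ [] := by simp [e]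
  rw [chars_splitOn_eq, PySem.List.pyGetD_neg_one _ _ hne]
  simp only [PySem.List.slice_to_neg_one]
  have hlast : (string.toList.splitOn ' ').getLast hne = (pyRpartitionSpace string.toList).2 := by
    rw [ha, List.getLastD_eq_getLast?, List.getLast?_eq_getLast (h := hne)]
    rfl
  have hfold : ((string.toList.splitOn ' ').dropLast).foldl (fun a i => (a ++ i) ++ [' ']) ([] : List Char)
      = ((string.toList.splitOn ' ').dropLast).flatMap (fun t => t ++ [' ']) := by
    simp only [List.append_assoc]
    exact PySem.List.foldl_append_eq_flatMap _ _ []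
  rw [hfold, hb, hlast]
  cases hpo : (pyRpartitionSpace string.toList).1 with
  | none => simp
  | some pre => simp
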